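-- pv_equiv track=rewrite | github.com/philiplugt/hitori-solver | archive/source_v2/hitori_check.py | no_adjacent_black_test
-- ===== SOURCE A (Python) =====
-- def no_adjacent_black_test(puzzle): # Rule 2
--     ps = range(len(puzzle)) # Puzzle size range
--     for i in ps:
--         for j in ps:
--             if puzzle[i][j] == 0:
--                 if i+1 < len(puzzle):
--                     if (puzzle[(i+1)][j] == 0):
--                         return False
--                 if i-1 >= 0:
--                     if (puzzle[(i-1)][j] == 0):
--                         return False
--                 if j+1 < len(puzzle):
--                     if (puzzle[i][(j+1)] == 0):
--                         return False
--                 if j-1 >= 0: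
--                     if (puzzle[i][(j-1)] == 0):
--                         return False
--     return True
-- ===== SOURCE B (Python) =====
-- def no_adjacent_black_test(puzzle): # Rule 2
--     # Edge passes instead of per-cell neighbor probes: scan horizontal then
--     # vertical adjacent pairs within the n x n square (n = len(puzzle)).
--     n = len(puzzle)
--     for row in puzzle:
--         for j in range(n - 1):
--             if row[j] == 0 and row[j + 1] == 0:
--                 return False
--     for i in range(n - 1):
--         for j in range(n):
--             if puzzle[i][j] == 0 and puzzle[i + 1][j] == 0:
--                 return False
--     return True
-- ===== Notes on version B (the rewrite author's own statement) =====
-- stated objective: alternative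
-- what changed: B scans horizontal then vertical adjacent pairs (edge iteration in two passes, iterating rows directly) instead of probing up to four neighbors of every cell behind bound guards.
-- outside the precondition, e.g. on no_adjacent_black_test([[0], [0], [7, 9], [], []]): A returns False, B raises IndexError; on no_adjacent_black_test([[0, 0], [0]]): A returns False, B returns False
import Mathlib
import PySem

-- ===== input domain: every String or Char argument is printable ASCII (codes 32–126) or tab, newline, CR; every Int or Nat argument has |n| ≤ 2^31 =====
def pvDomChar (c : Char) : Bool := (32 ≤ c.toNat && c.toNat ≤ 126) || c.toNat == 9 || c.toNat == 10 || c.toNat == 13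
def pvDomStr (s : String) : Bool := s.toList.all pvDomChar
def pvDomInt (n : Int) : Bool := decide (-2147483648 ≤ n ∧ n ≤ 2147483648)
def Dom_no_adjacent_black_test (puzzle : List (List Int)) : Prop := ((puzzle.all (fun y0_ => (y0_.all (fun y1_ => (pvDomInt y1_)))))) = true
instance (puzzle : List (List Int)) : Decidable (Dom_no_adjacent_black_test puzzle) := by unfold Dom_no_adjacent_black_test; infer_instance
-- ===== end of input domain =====

-- B replaces A's per-cell four-neighbor probing by two edge passes (horizontal
-- pairs, then vertical pairs) — an alternative decomposition, same cost.


-- ===== PORT A =====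
-- puzzle[i][j]; default 1 is never read under Pre_ (all indices used are in range there)
def pvCell (puzzle : List (List Int)) (i j : Int) : Int :=
  PySem.List.pyGetD (PySem.List.pyGetD puzzle i []) j 1

def no_adjacent_black_test (puzzle : List (List Int)) : Bool :=
  let n : Int := puzzle.length
  let ps := PySem.List.pyRange 0 n 1
  !(ps.any fun i => ps.any fun j =>
    pvCell puzzle i j == 0 &&
      ((decide (i + 1 < n) && pvCell puzzle (i + 1) j == 0) ||
       (decide (i - 1 ≥ 0) && pvCell puzzle (i - 1) j == 0) ||
       (decide (j + 1 < n) && pvCell puzzle i (j + 1) == 0) ||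
       (decide (j - 1 ≥ 0) && pvCell puzzle i (j - 1) == 0)))

-- ===== PORT B =====
def no_adjacent_black_test_alt (puzzle : List (List Int)) : Bool :=
  let n : Int := puzzle.length
  let horiz := puzzle.any fun row =>
    (PySem.List.pyRange 0 (n - 1) 1).any fun j =>
      PySem.List.pyGetD row j 1 == 0 && PySem.List.pyGetD row (j + 1) 1 == 0
  if horiz then false else
    !((PySem.List.pyRange 0 (n - 1) 1).any fun i =>
      (PySem.List.pyRange 0 n 1).any fun j =>
        pvCell puzzle i j == 0 && pvCell puzzle (i + 1) j == 0)

-- ===== PRECONDITION & SPEC =====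
-- Pre_ excludes ragged grids (some row shorter than the number of rows), on which
-- Python A raises IndexError unless an adjacent black pair is found before the
-- short row is reached; B's pass order can reach the short row elsewhere.
def Pre_no_adjacent_black_test (puzzle : List (List Int)) : Prop :=
  ∀ row ∈ puzzle, puzzle.length ≤ row.length
instance (puzzle : List (List Int)) : Decidable (Pre_no_adjacent_black_test puzzle) := by unfold Pre_no_adjacent_black_test; infer_instance

def pvWitness_no_adjacent_black_test : List (List Int) := [[0, 1, 0], [1, 0, 1], [0, 1, 0]]

def Spec_no_adjacent_black_test (puzzle : List (List Int)) (out : Bool) : Prop := out = no_adjacent_black_test_alt puzzle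
instance (puzzle : List (List Int)) (out : Bool) : Decidable (Spec_no_adjacent_black_test puzzle out) := by unfold Spec_no_adjacent_black_test; infer_instance

-- ===== CLAIM (what is proved, stated in full; the proofs are below) =====
def Claim_equal_no_adjacent_black_test : Prop := ∀ (puzzle : List (List Int)), Dom_no_adjacent_black_test puzzle → Pre_no_adjacent_black_test puzzle → Spec_no_adjacent_black_test puzzle (no_adjacent_black_test puzzle)

-- ===== LEMMAS AND PROOFS =====

-- A's per-cell neighbor test fires iff some horizontal or vertical adjacent black
-- pair exists; this is the whole content of the equivalence (holds for every input).
theorem pv_key (puzzle : List (List Int)) :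
    no_adjacent_black_test puzzle = no_adjacent_black_test_alt puzzle := by
  have hif : ∀ (h v : Bool), (if h = true then false else !v) = !(h || v) := by decide
  unfold no_adjacent_black_test no_adjacent_black_test_alt
  set n : Int := (puzzle.length : Int) with hn
  rw [hif, Bool.not_inj_iff, Bool.eq_iff_iff]
  simp only [List.any_eq_true, Bool.or_eq_true, Bool.and_eq_true, beq_iff_eq,
    decide_eq_true_eq, PySem.List.mem_pyRange_one]
  have hcell : ∀ (i : Int) (_ : 0 ≤ i) (_ : i < n),
      PySem.List.pyGetD puzzle i ([] : List Int) = puzzle[i.toNat]'(by omega) := by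
    intro i h0 h1
    simpa using PySem.List.pyGetD_eq_getElem (xs := puzzle) (d := ([] : List Int)) h0
      (by simpa [hn] using h1)
  constructor
  · rintro ⟨i, ⟨hi0, hin⟩, j, ⟨hj0, hjn⟩, hb, hnb⟩
    rcases hnb with ((⟨hlt, h2⟩ | ⟨hge, h2⟩) | ⟨hlt, h2⟩) | ⟨hge, h2⟩
    · exact Or.inr ⟨i, ⟨hi0, by omega⟩, j, ⟨hj0, hjn⟩, hb, h2⟩
    · exact Or.inr ⟨i - 1, ⟨by omega, by omega⟩, j, ⟨hj0, hjn⟩, by simpa using h2,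
        by simpa using hb⟩
    · refine Or.inl ⟨puzzle[i.toNat]'(by omega), List.getElem_mem (by omega), j,
        ⟨hj0, by omega⟩, ?_, ?_⟩
      · simpa [pvCell, hcell i hi0 hin] using hb
      · simpa [pvCell, hcell i hi0 hin] using h2
    · refine Or.inl ⟨puzzle[i.toNat]'(by omega), List.getElem_mem (by omega), j - 1,
        ⟨by omega, by omega⟩, ?_, ?_⟩
      · simpa [pvCell, hcell i hi0 hin] using h2
      · simpa [pvCell, hcell i hi0 hin] using hb
  · rintro (⟨row, hrow, j, ⟨hj0, hjn⟩, h1, h2⟩ | ⟨i, ⟨hi0, hin⟩, j, ⟨hj0, hjn⟩, h1, h2⟩)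
    · obtain ⟨k, hk, hkr⟩ := List.mem_iff_getElem.mp hrow
      have hkn : (k : Int) < n := by simp [hn]; omega
      refine ⟨(k : Int), ⟨by omega, hkn⟩, j, ⟨hj0, by omega⟩, ?_,
        Or.inl (Or.inr ⟨by omega, ?_⟩)⟩
      · show pvCell puzzle (k : Int) j = 0
        simpa [pvCell, hcell (k : Int) (by omega) hkn, hkr] using h1
      · show pvCell puzzle (k : Int) (j + 1) = 0
        simpa [pvCell, hcell (k : Int) (by omega) hkn, hkr] using h2
    · exact ⟨i, ⟨hi0, by omega⟩, j, ⟨hj0, hjn⟩, h1,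
        Or.inl (Or.inl (Or.inl ⟨by omega, h2⟩))⟩

-- ===== VERDICT (by name: the statement is the Claim_ definition above) =====
theorem no_adjacent_black_test_spec : Claim_equal_no_adjacent_black_test := by
  intro puzzle _ _
  exact pv_key puzzle
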